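-- pv_equiv track=rewrite | github.com/Bannersx/Proyecto1-Arqui | reconstruccionMuestreo.py | isNeg
-- ===== SOURCE A (Python) =====
-- def isNeg(value):
--
--     if value == "0":
--         return False
--
--     zeroCount = 0
--
--     found = False
--
--     index = 1
--
--     if value[0] != "1":
--         return False
--
--     while zeroCount < 7 and not found and index < len(value):
--         if value[index] == "0":
--             zeroCount += 1
--
--         else:
--             found = True
--
--         index += 1
--
--     if not found and zeroCount < 7:
--         return False
--
--     if found:
--         return False
--
--     return True
-- ===== SOURCE B (Python) =====
-- def isNeg(value):
--     if value[0] != "1":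
--         return False
--     return value[1:8] == "0000000"
-- ===== Notes on version B (the rewrite author's own statement) =====
-- stated objective: simpler
-- what changed: Replaces the while loop with its zeroCount/found/index state by a single slice comparison checking that the seven characters after the guard position are all zero.
import Mathlib
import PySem

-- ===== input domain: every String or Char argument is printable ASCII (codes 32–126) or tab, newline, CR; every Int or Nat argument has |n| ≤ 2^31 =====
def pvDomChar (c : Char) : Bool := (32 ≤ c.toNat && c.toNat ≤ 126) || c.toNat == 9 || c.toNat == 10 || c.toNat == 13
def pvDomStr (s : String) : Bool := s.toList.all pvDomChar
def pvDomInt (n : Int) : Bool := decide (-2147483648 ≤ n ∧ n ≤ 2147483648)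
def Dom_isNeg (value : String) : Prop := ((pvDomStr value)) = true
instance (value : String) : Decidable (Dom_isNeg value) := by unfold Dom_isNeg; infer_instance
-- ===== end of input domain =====

-- B replaces A's while loop and its zeroCount/found/index state by the single
-- slice comparison value[1:8] == "0000000" after the value[0] guard (simpler).

-- ===== PORT A =====
-- the while loop: state (zeroCount, found), scanning from index 1 onward
def isNegLoop : List Char → Nat → Bool → Nat × Bool
  | [], z, f => (z, f)
  | c :: rest, z, f =>
    if z < 7 && !f then
      if c = '0' then isNegLoop rest (z + 1) f else isNegLoop rest z true
    else (z, f)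

def isNeg (value : String) : Bool :=
  if value = "0" then false
  else if PySem.Str.pyGet? value 0 ≠ some '1' then false
  else
    let p := isNegLoop (value.toList.drop 1) 0 false
    if !p.2 && decide (p.1 < 7) then false
    else if p.2 then false
    else true

-- ===== PORT B =====
def isNeg_alt (value : String) : Bool :=
  if PySem.Str.pyGet? value 0 ≠ some '1' then false
  else decide (PySem.List.slice value.toList (some 1) (some 8) = "0000000".toList)

-- ===== PRECONDITION & SPEC =====
-- A (and B) raise IndexError on the empty string (value[0]); only that input is excluded.
def Pre_isNeg (value : String) : Prop := value ≠ ""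
instance (value : String) : Decidable (Pre_isNeg value) := by unfold Pre_isNeg; infer_instance
def pvWitness_isNeg : String := "10000000"

def Spec_isNeg (value : String) (out : Bool) : Prop := out = isNeg_alt value
instance (value : String) (out : Bool) : Decidable (Spec_isNeg value out) := by unfold Spec_isNeg; infer_instance

-- ===== CLAIM (what is proved, stated in full; the proofs are below) =====
def Claim_equal_isNeg : Prop := ∀ (value : String), Dom_isNeg value → Pre_isNeg value → Spec_isNeg value (isNeg value)

-- ===== LEMMAS AND PROOFS =====

theorem isNegLoop_found (cs : List Char) (z : Nat) : isNegLoop cs z true = (z, true) := by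
  cases cs <;> simp [isNegLoop]

theorem isNegLoop_done (cs : List Char) (z : Nat) (h : 7 ≤ z) (f : Bool) :
    isNegLoop cs z f = (z, f) := by
  cases cs
  · simp [isNegLoop]
  · simp [isNegLoop]; omega

-- characterisation of the loop's exit state: A accepts iff the next 7 - z chars are all '0'
theorem isNegLoop_char (cs : List Char) (z : Nat) (hz : z < 7) :
    ((!(isNegLoop cs z false).2 && decide (7 ≤ (isNegLoop cs z false).1)) = true)
      ↔ cs.take (7 - z) = List.replicate (7 - z) '0' := by
  induction cs generalizing z with
  | nil =>
    simp [isNegLoop]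
    omega
  | cons c rest ih =>
    have h7 : 7 - z = (7 - (z + 1)) + 1 := by omega
    by_cases hc : c = '0'
    · subst hc
      by_cases hz1 : z + 1 < 7
      · simp [isNegLoop, hz, ih (z + 1) hz1, h7, List.replicate_succ]
      · have hz7 : z + 1 = 7 := by omega
        rw [show 7 - z = 1 by omega]
        simp [isNegLoop, hz, isNegLoop_done rest (z + 1) (by omega) false,
          List.replicate_succ]
        omega
    · rw [h7]
      simp [isNegLoop, hz, hc, isNegLoop_found, List.replicate_succ]

theorem isNeg_spec_aux (value : String) (h : value ≠ "") :
    isNeg value = isNeg_alt value := by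
  obtain ⟨c, rest, hl⟩ : ∃ c rest, value.toList = c :: rest := by
    cases hv : value.toList with
    | nil => exact absurd (String.toList_eq_nil_iff.mp hv) h
    | cons c rest => exact ⟨c, rest, rfl⟩
  have hget : PySem.Str.pyGet? value 0 = some c := by
    simp [PySem.Str.pyGet?, hl]
  have hgetL : PySem.List.pyGet? value.toList 0 = some c := by
    rw [hl]; simp
  have hslice : PySem.List.slice value.toList (some 1) (some 8) = rest.take 7 := by
    have h1 : ((1 : Nat) : Int) = (1 : Int) := by norm_num
    have h8 : ((8 : Nat) : Int) = (8 : Int) := by norm_num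
    rw [← h1, ← h8, PySem.List.slice_natCast, hl]
    simp
  by_cases hc : c = '1'
  · subst hc
    have h0 : value ≠ "0" := by
      intro h0; subst h0; simp at hl
    have hne : ¬ (PySem.Str.pyGet? value 0 ≠ some '1') := fun hx => hx hget
    rw [isNeg, isNeg_alt, if_neg h0, if_neg hne, if_neg hne, hslice]
    simp only [hl, List.drop_one, List.tail_cons]
    have hrep : ("0000000".toList : List Char) = List.replicate 7 '0' := by decide
    rw [hrep]
    have hiff := isNegLoop_char rest 0 (by omega)
    simp only [Nat.sub_zero] at hiff
    rcases hp : isNegLoop rest 0 false with ⟨zc, fd⟩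
    rw [hp] at hiff
    by_cases hall : rest.take 7 = List.replicate 7 '0'
    · have hb := hiff.mpr hall
      simp at hb
      simp [hb.1, hall]
      omega
    · have hb : ¬ ((!fd && decide (7 ≤ zc)) = true) := fun hx => hall (hiff.mp hx)
      simp only [hall, Bool.and_eq_true, Bool.not_eq_true'] at *
      cases fd
      · simp at hb
        simp
        omega
      · simp
  · have hne : PySem.Str.pyGet? value 0 ≠ some '1' :=
      fun hx => hc (Option.some.inj (hget.symm.trans hx))
    rw [isNeg, isNeg_alt, if_pos hne, if_pos hne]
    split <;> rfl
-- ===== VERDICT (by name: the statement is the Claim_ definition above) =====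
theorem isNeg_spec : Claim_equal_isNeg := by
  intro value _ hpre
  exact isNeg_spec_aux value hpre
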